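-- pv_equiv track=rewrite | github.com/jhacksman/cmw | attempts/tested/2026-01-06-569m-elongated-patterns/generate_569m.py | generate_pootato
-- ===== SOURCE A (Python) =====
-- P_VARIANTS = ['p', 'P']
--
-- O_VARIANTS = ['o', 'O', '0']
--
-- T_VARIANTS = ['t', 'T']
--
-- A_VARIANTS = ['a', 'A', '4', '@']
--
-- def distribute_os(total_os, num_positions):
--     """
--     Generate all ways to distribute total_os among num_positions,
--     where each position gets at least 1.
--     Uses stars and bars algorithm.
--     """
--     if num_positions == 1:
--         yield [total_os]
--         return
--
--     if num_positions == 2: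
--         for first in range(1, total_os):
--             yield [first, total_os - first]
--         return
--
--     if num_positions == 3:
--         for first in range(1, total_os - 1):
--             for second in range(1, total_os - first):
--                 third = total_os - first - second
--                 if third >= 1:
--                     yield [first, second, third]
--         return
--
--     if num_positions == 4:
--         for first in range(1, total_os - 2):
--             for second in range(1, total_os - first - 1):
--                 for third in range(1, total_os - first - second):
--                     fourth = total_os - first - second - third
--                     if fourth >= 1:
--                         yield [first, second, third, fourth]
--         return
--
-- def generate_pootato(min_len=10, max_len=20):
--     """
--     Generate pootato patterns: p + o(s) + o(s) + t + a + t + o(s)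
--     Base: 7 chars, 3 o-positions
--     """
--     for length in range(min_len, max_len + 1):
--         total_os = length - 4  # p, t, a, t = 4 non-o chars
--         if total_os < 3:
--             continue
--
--         for dist in distribute_os(total_os, 3):
--             for p in P_VARIANTS:
--                 for o in O_VARIANTS:
--                     for t in T_VARIANTS:
--                         for a in A_VARIANTS:
--                             word = p + (o * dist[0]) + (o * dist[1]) + t + a + t + (o * dist[2])
--                             yield word
-- ===== SOURCE B (Python) =====
-- P_VARIANTS = ['p', 'P']
--
-- O_VARIANTS = ['o', 'O', '0']
--
-- T_VARIANTS = ['t', 'T']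
--
-- A_VARIANTS = ['a', 'A', '4', '@']
--
-- def distribute(total, n):
--     """All ways to put `total` o's into `n` positions, each >= 1,
--     as one recursive stars-and-bars recurrence (no per-n case analysis)."""
--     if n == 1:
--         yield [total]
--     else:
--         for first in range(1, total - n + 2):
--             for rest in distribute(total - first, n - 1):
--                 yield [first] + rest
--
-- def generate_pootato(min_len=10, max_len=20):
--     for length in range(min_len, max_len + 1):
--         total = length - 4
--         if total >= 3:
--             for dist in distribute(total, 3):
--                 yield from (p + o * dist[0] + o * dist[1] + t + a + t + o * dist[2]
--                             for p in P_VARIANTS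
--                             for o in O_VARIANTS
--                             for t in T_VARIANTS
--                             for a in A_VARIANTS)
-- ===== Notes on version B (the rewrite author's own statement) =====
-- stated objective: simpler
-- what changed: The hardcoded per-arity case analysis (separate nested loops for 1-4 positions) is replaced by one recursive stars-and-bars recurrence, and the generator body emits words via a single comprehension (yield from) instead of four explicit accumulating loops.
import Mathlib
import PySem

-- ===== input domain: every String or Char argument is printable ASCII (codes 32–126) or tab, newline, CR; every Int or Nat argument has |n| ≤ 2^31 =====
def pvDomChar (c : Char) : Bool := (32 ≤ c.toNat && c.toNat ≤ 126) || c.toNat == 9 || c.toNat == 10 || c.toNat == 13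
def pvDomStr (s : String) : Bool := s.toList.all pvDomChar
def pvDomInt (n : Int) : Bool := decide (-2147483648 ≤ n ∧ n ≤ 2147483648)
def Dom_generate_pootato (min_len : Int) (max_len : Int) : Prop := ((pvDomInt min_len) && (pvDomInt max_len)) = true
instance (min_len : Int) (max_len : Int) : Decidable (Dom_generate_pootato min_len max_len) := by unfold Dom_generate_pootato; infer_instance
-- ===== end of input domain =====

-- B replaces A's hardcoded per-arity distribution loops by one recursive stars-and-bars
-- recurrence and emits words by flatMap/map instead of accumulating folds (objective: simpler).

-- ===== PORT A =====
def pvP_VARIANTS : List String := ["p", "P"]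
def pvO_VARIANTS : List String := ["o", "O", "0"]
def pvT_VARIANTS : List String := ["t", "T"]
def pvA_VARIANTS : List String := ["a", "A", "4", "@"]

-- Python 's * n' for a string (n ≤ 0 gives ""); shared by both ports as the word builder.
def pvStrMul (s : String) (n : Int) : String := String.join (List.replicate n.toNat s)

def pvWord (p o t a : String) (d : List Int) : String :=
  p ++ pvStrMul o (PySem.List.pyGetD d 0 0) ++ pvStrMul o (PySem.List.pyGetD d 1 0)
    ++ t ++ a ++ t ++ pvStrMul o (PySem.List.pyGetD d 2 0)

-- literal port of distribute_os (the generator's yields collected in order)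
def distribute_os (total_os : Int) (num_positions : Int) : List (List Int) :=
  if num_positions = 1 then [[total_os]]
  else if num_positions = 2 then
    (PySem.List.pyRange 1 total_os 1).foldl
      (fun acc first => acc ++ [[first, total_os - first]]) []
  else if num_positions = 3 then
    (PySem.List.pyRange 1 (total_os - 1) 1).foldl (fun acc first =>
      (PySem.List.pyRange 1 (total_os - first) 1).foldl (fun acc2 second =>
        let third := total_os - first - second
        if third ≥ 1 then acc2 ++ [[first, second, third]] else acc2) acc) []
  else if num_positions = 4 then
    (PySem.List.pyRange 1 (total_os - 2) 1).foldl (fun acc first =>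
      (PySem.List.pyRange 1 (total_os - first - 1) 1).foldl (fun acc2 second =>
        (PySem.List.pyRange 1 (total_os - first - second) 1).foldl (fun acc3 third =>
          let fourth := total_os - first - second - third
          if fourth ≥ 1 then acc3 ++ [[first, second, third, fourth]] else acc3) acc2) acc) []
  else []

def generate_pootato (min_len : Int) (max_len : Int) : List String :=
  (PySem.List.pyRange min_len (max_len + 1) 1).foldl (fun acc length =>
    let total_os := length - 4
    if total_os < 3 then acc
    else
      (distribute_os total_os 3).foldl (fun acc dist =>
        pvP_VARIANTS.foldl (fun acc p =>
          pvO_VARIANTS.foldl (fun acc o =>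
            pvT_VARIANTS.foldl (fun acc t =>
              pvA_VARIANTS.foldl (fun acc a =>
                acc ++ [pvWord p o t a dist]) acc) acc) acc) acc) acc) []

-- ===== PORT B =====
-- recursive stars-and-bars generator (Source B's distribute; n is the position count, called with 3)
def pvDistribute (total : Int) : Nat → List (List Int)
  | 0 => []   -- Source B never calls distribute with n < 1
  | 1 => [[total]]
  | (n + 2) =>
    (PySem.List.pyRange 1 (total - ((n + 2 : Nat) : Int) + 2) 1).flatMap (fun first =>
      (pvDistribute (total - first) (n + 1)).map (fun rest => first :: rest))

def generate_pootato_alt (min_len : Int) (max_len : Int) : List String :=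
  (PySem.List.pyRange min_len (max_len + 1) 1).flatMap (fun length =>
    let total := length - 4
    if total ≥ 3 then
      (pvDistribute total 3).flatMap (fun dist =>
        pvP_VARIANTS.flatMap (fun p =>
          pvO_VARIANTS.flatMap (fun o =>
            pvT_VARIANTS.flatMap (fun t =>
              pvA_VARIANTS.map (fun a => pvWord p o t a dist)))))
    else [])

-- ===== PRECONDITION & SPEC =====
def Spec_generate_pootato (min_len : Int) (max_len : Int) (out : List String) : Prop := out = generate_pootato_alt min_len max_len
instance (min_len : Int) (max_len : Int) (out : List String) : Decidable (Spec_generate_pootato min_len max_len out) := by unfold Spec_generate_pootato; infer_instance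

-- ===== CLAIM (what is proved, stated in full; the proofs are below) =====
def Claim_equal_generate_pootato : Prop := ∀ (min_len : Int) (max_len : Int), Dom_generate_pootato min_len max_len → Spec_generate_pootato min_len max_len (generate_pootato min_len max_len)

-- ===== LEMMAS AND PROOFS =====

-- A's hardcoded 3-position loops produce exactly B's recursive distribution, in the same order.
lemma inner_eq (t first : Int) (acc : List (List Int)) :
    (PySem.List.pyRange 1 (t - first) 1).foldl (fun acc2 second =>
        let third := t - first - second
        if third ≥ 1 then acc2 ++ [[first, second, third]] else acc2) acc
    = acc ++ (PySem.List.pyRange 1 (t - first) 1).map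
        (fun second => [first, second, t - first - second]) := by
  rw [PySem.List.foldl_congr_mem
      (g := fun acc2 second => acc2 ++ [[first, second, t - first - second]])]
  · exact PySem.List.foldl_append_singleton_eq_map _ _ _
  · intro acc2 x hx
    have h := PySem.List.mem_pyRange_one.mp hx
    simp only []
    rw [if_pos (by omega)]

lemma distribute_eq (t : Int) : distribute_os t 3 = pvDistribute t 3 := by
  unfold distribute_os pvDistribute pvDistribute
  norm_num
  have h1 : t - 3 + 2 = t - 1 := by ring
  rw [h1]
  rw [PySem.List.foldl_congr_mem
      (g := fun acc first => acc ++ (PySem.List.pyRange 1 (t - first) 1).map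
        (fun second => [first, second, t - first - second]))
      (h := fun acc x _ => inner_eq t x acc)]
  rw [PySem.List.foldl_append_eq_flatMap]
  simp only [List.nil_append]
  congr 1
  funext first
  unfold pvDistribute
  simp [List.flatMap]
  induction (PySem.List.pyRange 1 (t - first) 1) with
  | nil => rfl
  | cons h tl ih => simp [Function.comp_def] at ih ⊢; exact ih

-- A's four accumulating variant loops are B's flatMap/map comprehension.
lemma variants_eq (dist : List Int) (acc : List String) :
    pvP_VARIANTS.foldl (fun acc p =>
      pvO_VARIANTS.foldl (fun acc o =>
        pvT_VARIANTS.foldl (fun acc t =>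
          pvA_VARIANTS.foldl (fun acc a =>
            acc ++ [pvWord p o t a dist]) acc) acc) acc) acc
    = acc ++ pvP_VARIANTS.flatMap (fun p =>
        pvO_VARIANTS.flatMap (fun o =>
          pvT_VARIANTS.flatMap (fun t =>
            pvA_VARIANTS.map (fun a => pvWord p o t a dist)))) := by
  simp [pvP_VARIANTS, pvO_VARIANTS, pvT_VARIANTS, pvA_VARIANTS, List.foldl, List.flatMap]

lemma generate_eq (min_len max_len : Int) :
    generate_pootato min_len max_len = generate_pootato_alt min_len max_len := by
  unfold generate_pootato generate_pootato_alt
  rw [PySem.List.foldl_congr_mem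
      (g := fun acc length => acc ++
        (if length - 4 ≥ 3 then
          (pvDistribute (length - 4) 3).flatMap (fun dist =>
            pvP_VARIANTS.flatMap (fun p =>
              pvO_VARIANTS.flatMap (fun o =>
                pvT_VARIANTS.flatMap (fun t =>
                  pvA_VARIANTS.map (fun a => pvWord p o t a dist)))))
         else []))]
  · rw [PySem.List.foldl_append_eq_flatMap]
    simp only [List.nil_append]
  · intro acc length _
    simp only []
    by_cases hlt : length - 4 < 3
    · rw [if_pos hlt, if_neg (by omega), List.append_nil]
    · rw [if_neg hlt, if_pos (by omega), ← distribute_eq]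
      rw [PySem.List.foldl_congr_mem
          (g := fun acc dist => acc ++
            pvP_VARIANTS.flatMap (fun p =>
              pvO_VARIANTS.flatMap (fun o =>
                pvT_VARIANTS.flatMap (fun t =>
                  pvA_VARIANTS.map (fun a => pvWord p o t a dist)))))
          (h := fun acc dist _ => variants_eq dist acc)]
      rw [PySem.List.foldl_append_eq_flatMap]

-- ===== VERDICT (by name: the statement is the Claim_ definition above) =====
theorem generate_pootato_spec : Claim_equal_generate_pootato := by
  intro min_len max_len _
  unfold Spec_generate_pootato
  exact generate_eq min_len max_len
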